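-- pv_equiv track=rewrite | github.com/N3uralCreativity/KeyLight | src/keylight/sound_reactive.py | _center_out_positions
-- ===== SOURCE A (Python) =====
-- def _center_out_positions(count: int) -> list[int]:
--     if count <= 0:
--         return []
--     if count % 2 == 0:
--         left = (count // 2) - 1
--         right = count // 2
--         positions = [left, right]
--         offset = 1
--         while len(positions) < count:
--             if left - offset >= 0:
--                 positions.append(left - offset)
--             if right + offset < count:
--                 positions.append(right + offset)
--             offset += 1
--         return positions[:count]
--
--     center = count // 2
--     positions = [center]
--     offset = 1
--     while len(positions) < count:
--         if center - offset >= 0: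
--             positions.append(center - offset)
--         if center + offset < count:
--             positions.append(center + offset)
--         offset += 1
--     return positions[:count]
-- ===== SOURCE B (Python) =====
-- def _center_out_positions(count: int) -> list[int]:
--     # One key-based sort: primary key = integer distance from the center
--     # (doubled to stay integral), secondary key = the index itself so the
--     # left partner of each pair comes first, matching the center-out order.
--     return sorted(range(count), key=lambda i: (abs(2 * i - (count - 1)), i))
-- ===== Notes on version B (the rewrite author's own statement) =====
-- stated objective: simpler
-- what changed: Replaces the two-branch incremental while loop (appending left/right partners per offset) with a single sort of range(count) keyed by (abs(2*i-(count-1)), i).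
import Mathlib
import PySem

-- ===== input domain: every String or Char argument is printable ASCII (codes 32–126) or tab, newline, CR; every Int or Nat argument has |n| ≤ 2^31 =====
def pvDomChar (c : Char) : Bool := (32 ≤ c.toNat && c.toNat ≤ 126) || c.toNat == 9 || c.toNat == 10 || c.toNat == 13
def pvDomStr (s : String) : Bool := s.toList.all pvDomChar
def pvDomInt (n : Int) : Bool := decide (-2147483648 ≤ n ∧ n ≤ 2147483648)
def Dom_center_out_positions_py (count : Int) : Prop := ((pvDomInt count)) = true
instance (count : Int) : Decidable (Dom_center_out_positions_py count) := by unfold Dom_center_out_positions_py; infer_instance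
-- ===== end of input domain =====

-- B replaces A's incremental two-sided while loop with one key-based sort of range(count);
-- objective: simpler (no speed claim).

-- ===== PORT A =====
-- the while loop, textually identical in A's even and odd branches (lo/hi = left/right resp. center/center);
-- fuel only makes the recursion structural, count.toNat steps are always enough
def pyCenterLoop (count lo hi : Int) (positions : List Int) (offset : Int) : Nat → List Int
  | 0 => positions
  | fuel + 1 =>
    if (positions.length : Int) < count then
      let p1 := if 0 ≤ lo - offset then positions ++ [lo - offset] else positions
      let p2 := if hi + offset < count then p1 ++ [hi + offset] else p1
      pyCenterLoop count lo hi p2 (offset + 1) fuel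
    else positions

def center_out_positions_py (count : Int) : List Int :=
  if count ≤ 0 then []
  else if PySem.Int.mod count 2 = 0 then
    let left := PySem.Int.floordiv count 2 - 1
    let right := PySem.Int.floordiv count 2
    PySem.List.slice (pyCenterLoop count left right [left, right] 1 count.toNat) none (some count)
  else
    let center := PySem.Int.floordiv count 2
    PySem.List.slice (pyCenterLoop count center center [center] 1 count.toNat) none (some count)

-- ===== PORT B =====
def center_out_positions_py_alt (count : Int) : List Int :=
  PySem.List.sorted2 (PySem.List.pyRange 0 count 1)
    (fun i => |2 * i - (count - 1)|) (fun i => i) false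

-- ===== PRECONDITION & SPEC =====
def Spec_center_out_positions_py (count : Int) (out : List Int) : Prop := out = center_out_positions_py_alt count
instance (count : Int) (out : List Int) : Decidable (Spec_center_out_positions_py count out) := by unfold Spec_center_out_positions_py; infer_instance

-- ===== CLAIM (what is proved, stated in full; the proofs are below) =====
def Claim_equal_center_out_positions_py : Prop := ∀ (count : Int), Dom_center_out_positions_py count → Spec_center_out_positions_py count (center_out_positions_py count)

-- ===== LEMMAS AND PROOFS =====

-- the primary sort key of B
def pvK (n i : Int) : Int := |2 * i - (n - 1)|

-- strict lexicographic order on (pvK n i, i)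
def pvSlex (n a b : Int) : Prop := pvK n a < pvK n b ∨ (pvK n a = pvK n b ∧ a < b)

-- the pairs appended by A's loop for offsets o, o+1, …, o+r-1
def pvPairs (c d : Int) (o : Int) : Nat → List Int
  | 0 => []
  | r + 1 => (c - o) :: (d + o) :: pvPairs c d (o + 1) r

lemma pvPairs_length (c d : Int) : ∀ (r : Nat) (o : Int), (pvPairs c d o r).length = 2 * r := by
  intro r
  induction r with
  | zero => intro o; rfl
  | succ r ih => intro o; simp [pvPairs, ih (o + 1)]; omega

-- A's loop, run to completion, appends exactly the remaining pairs
lemma pyCenterLoop_run (c d : Int) :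
    ∀ (r fuel : Nat) (o : Int) (P : List Int), o = c + 1 - r → (P.length : Int) = c + d + 1 - 2 * r →
      r ≤ fuel → pyCenterLoop (c + d + 1) c d P o fuel = P ++ pvPairs c d o r := by
  intro r
  induction r with
  | zero =>
    intro fuel o P ho hP _
    cases fuel with
    | zero => simp [pyCenterLoop, pvPairs]
    | succ f =>
      have : ¬ ((P.length : Int) < c + d + 1) := by omega
      simp [pyCenterLoop, this, pvPairs]
  | succ r ih =>
    intro fuel o P ho hP hfuel
    cases fuel with
    | zero => omega
    | succ f =>
      have hlt : (P.length : Int) < c + d + 1 := by push_cast at hP ⊢; omega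
      have h1 : 0 ≤ c - o := by omega
      have h2 : d + o < c + d + 1 := by omega
      have hrec := ih f (o + 1) ((P ++ [c - o]) ++ [d + o])
        (by omega) (by push_cast at hP ⊢; simp; omega) (by omega)
      simp only [pyCenterLoop, if_pos hlt, if_pos h1, if_pos h2]
      rw [hrec]
      simp [pvPairs]

-- pvPairs is a permutation of the two flanking ranges
lemma pvPairs_perm (c d : Int) : ∀ (r : Nat) (o : Int),
    (pvPairs c d o r).Perm
      (PySem.List.pyRange (c - o - r + 1) (c - o + 1) 1 ++ PySem.List.pyRange (d + o) (d + o + r) 1) := by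
  intro r
  induction r with
  | zero =>
    intro o
    rw [PySem.List.pyRange_one_eq_nil (by push_cast; omega),
        PySem.List.pyRange_one_eq_nil (by push_cast; omega)]
    simp [pvPairs]
  | succ r ih =>
    intro o
    have e1 : c - o - (r + 1 : Nat) + 1 = c - o - r := by push_cast; ring
    have e3 : d + o + (r + 1 : Nat) = (d + o + r) + 1 := by push_cast; ring
    rw [e1, e3]
    rw [show PySem.List.pyRange (c - o - r) (c - o + 1) 1
          = PySem.List.pyRange (c - o - r) (c - o) 1 ++ [c - o] from
        PySem.List.pyRange_one_succ_right (by omega)]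
    rw [show PySem.List.pyRange (d + o) (d + o + r + 1) 1
          = (d + o) :: PySem.List.pyRange (d + o + 1) (d + o + r + 1) 1 from
        PySem.List.pyRange_one_cons (by omega)]
    have ih' := ih (o + 1)
    have f1 : c - (o + 1) - r + 1 = c - o - r := by ring
    have f2 : c - (o + 1) + 1 = c - o := by ring
    have f3 : d + (o + 1) = d + o + 1 := by ring
    have f4 : d + (o + 1) + r = d + o + r + 1 := by ring
    rw [f1, f2, f3] at ih'
    have f5 : d + o + 1 + (r : Int) = d + o + r + 1 := by ring
    rw [f5] at ih'
    refine ((ih'.cons (d + o)).cons (c - o)).trans ?_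
    have h1 : ((d + o) :: (PySem.List.pyRange (c - o - r) (c - o) 1 ++ PySem.List.pyRange (d + o + 1) (d + o + r + 1) 1)).Perm
        (PySem.List.pyRange (c - o - r) (c - o) 1 ++ (d + o) :: PySem.List.pyRange (d + o + 1) (d + o + r + 1) 1) :=
      List.perm_middle.symm
    have h2 : (((c - o) :: PySem.List.pyRange (c - o - r) (c - o) 1) ++ ((d + o) :: PySem.List.pyRange (d + o + 1) (d + o + r + 1) 1)).Perm
        ((PySem.List.pyRange (c - o - r) (c - o) 1 ++ [c - o]) ++ ((d + o) :: PySem.List.pyRange (d + o + 1) (d + o + r + 1) 1)) :=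
      (List.perm_append_singleton (c - o) (PySem.List.pyRange (c - o - r) (c - o) 1)).symm.append_right _
    exact (h1.cons (c - o)).trans h2

-- key values on the two sides of the center
lemma pvK_left (c d j : Int) (hcd : c ≤ d) (hj : 0 ≤ j) : pvK (c + d + 1) (c - j) = 2 * j + (d - c) := by
  unfold pvK; rw [abs_of_nonpos (by omega)]; omega

lemma pvK_right (c d j : Int) (hcd : c ≤ d) (hj : 0 ≤ j) : pvK (c + d + 1) (d + j) = 2 * j + (d - c) := by
  unfold pvK; rw [abs_of_nonneg (by omega)]; omega

-- chain of the strict lexicographic order along pvPairs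
lemma pvPairs_chain (c d : Int) (hcd : c ≤ d) :
    ∀ (r : Nat) (o : Int), 1 ≤ o → List.IsChain (pvSlex (c + d + 1)) (pvPairs c d o r) := by
  intro r
  induction r with
  | zero => intro o _; exact List.IsChain.nil
  | succ r ih =>
    intro o ho
    refine List.IsChain.cons_cons ?_ ?_
    · right
      constructor
      · rw [pvK_left c d o hcd (by omega), pvK_right c d o hcd (by omega)]
      · omega
    · refine List.IsChain.cons (ih (o + 1) (by omega)) ?_
      intro y hy
      cases r with
      | zero => simp [pvPairs] at hy
      | succ r' =>
        simp only [pvPairs, List.head?_cons, Option.mem_def, Option.some.injEq] at hy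
        subst hy
        left
        rw [pvK_left c d (o + 1) hcd (by omega), pvK_right c d o hcd (by omega)]
        omega

lemma pvPairs_head (c d o : Int) (r : Nat) (y : Int) (hy : y ∈ (pvPairs c d o r).head?) :
    y = c - o := by
  cases r with
  | zero => simp [pvPairs] at hy
  | succ r => simp only [pvPairs, List.head?_cons, Option.mem_def, Option.some.injEq] at hy; omega

-- sorted2 with an injective secondary key (the identity): any strictly lex-increasing
-- permutation of xs is THE sorted list
lemma pvBefore_true (f : Int → Int) (a b : Int)
    (h : (decide (f a < f b) || (!decide (f b < f a) && decide (a < b))) = true) :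
    f a < f b ∨ (f a = f b ∧ a ≤ b) := by
  simp at h; omega

lemma pvBefore_false (f : Int → Int) (a b : Int)
    (h : (decide (f a < f b) || (!decide (f b < f a) && decide (a < b))) = false) :
    f b < f a ∨ (f b = f a ∧ b ≤ a) := by
  simp at h; omega

lemma pairwise_insertBy (f : Int → Int) (x : Int) :
    ∀ (l : List Int), l.Pairwise (fun a b => f a < f b ∨ (f a = f b ∧ a ≤ b)) →
      (PySem.List.insertBy (fun a b => decide (f a < f b) || (!decide (f b < f a) && decide (a < b))) x l).Pairwise
        (fun a b => f a < f b ∨ (f a = f b ∧ a ≤ b)) := by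
  intro l
  induction l with
  | nil => intro _; simp [PySem.List.insertBy]
  | cons y ys ih =>
    intro hp
    rw [List.pairwise_cons] at hp
    obtain ⟨hy, hys⟩ := hp
    by_cases h : (decide (f x < f y) || (!decide (f y < f x) && decide (x < y))) = true
    · rw [show PySem.List.insertBy (fun a b => decide (f a < f b) || (!decide (f b < f a) && decide (a < b))) x (y :: ys)
            = x :: y :: ys from by simp [PySem.List.insertBy, h]]
      have hxy := pvBefore_true f x y h
      refine List.pairwise_cons.mpr ⟨?_, List.pairwise_cons.mpr ⟨hy, hys⟩⟩
      intro z hz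
      rcases List.mem_cons.mp hz with rfl | hz
      · exact hxy
      · have := hy z hz; omega
    · rw [show PySem.List.insertBy (fun a b => decide (f a < f b) || (!decide (f b < f a) && decide (a < b))) x (y :: ys)
            = y :: PySem.List.insertBy (fun a b => decide (f a < f b) || (!decide (f b < f a) && decide (a < b))) x ys from by
          simp only [PySem.List.insertBy]
          rw [if_neg h]]
      have hyx := pvBefore_false f x y (by revert h; cases hb : (decide (f x < f y) || (!decide (f y < f x) && decide (x < y))) <;> simp)
      refine List.pairwise_cons.mpr ⟨?_, ih hys⟩
      intro z hz
      rcases (PySem.List.mem_insertBy _ x z ys).mp hz with rfl | hz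
      · omega
      · exact hy z hz

lemma pairwise_foldl_insertBy (f : Int → Int) :
    ∀ (xs acc : List Int), acc.Pairwise (fun a b => f a < f b ∨ (f a = f b ∧ a ≤ b)) →
      (xs.foldl (fun acc x => PySem.List.insertBy (fun a b => decide (f a < f b) || (!decide (f b < f a) && decide (a < b))) x acc) acc).Pairwise
        (fun a b => f a < f b ∨ (f a = f b ∧ a ≤ b)) := by
  intro xs
  induction xs with
  | nil => intro acc h; simpa using h
  | cons x xs ih =>
    intro acc h
    exact ih _ (pairwise_insertBy f x acc h)

lemma sorted2_unique (f : Int → Int) (xs ys : List Int) (hperm : ys.Perm xs)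
    (hpw : ys.Pairwise (fun a b => f a < f b ∨ (f a = f b ∧ a < b))) :
    PySem.List.sorted2 xs f (fun i => i) false = ys := by
  have hfold : PySem.List.sorted2 xs f (fun i => i) false
      = xs.foldl (fun acc x => PySem.List.insertBy (fun a b => decide (f a < f b) || (!decide (f b < f a) && decide (a < b))) x acc) [] := rfl
  have hres_pw := pairwise_foldl_insertBy f xs [] (by simp)
  rw [← hfold] at hres_pw
  have hres_perm : (PySem.List.sorted2 xs f (fun i => i) false).Perm xs :=
    PySem.List.sorted2_perm xs f (fun i => i) false
  have hys_pw : ys.Pairwise (fun a b => f a < f b ∨ (f a = f b ∧ a ≤ b)) := by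
    refine hpw.imp ?_
    intro a b h; omega
  refine List.Perm.eq_of_pairwise ?_ hres_pw hys_pw (hres_perm.trans hperm.symm)
  intro a b _ _ hab hba
  omega

-- ===== VERDICT (by name: the statement is the Claim_ definition above) =====
lemma pvSlex_trans (n a b c : Int) (h1 : pvSlex n a b) (h2 : pvSlex n b c) : pvSlex n a c := by
  unfold pvSlex at *; omega

lemma pvChain_pairwise (n : Int) (l : List Int) (h : List.IsChain (pvSlex n) l) :
    l.Pairwise (pvSlex n) := by
  haveI : Trans (pvSlex n) (pvSlex n) (pvSlex n) :=
    ⟨fun hab hbc => pvSlex_trans n _ _ _ hab hbc⟩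
  exact List.isChain_iff_pairwise.mp h

theorem center_out_positions_py_spec : Claim_equal_center_out_positions_py := by
  intro count _
  unfold Spec_center_out_positions_py center_out_positions_py center_out_positions_py_alt
  by_cases h0 : count ≤ 0
  · rw [if_pos h0, PySem.List.pyRange_one_eq_nil h0]
    rfl
  · rw [if_neg h0]
    have hpos : 0 < count := by omega
    simp only [PySem.Int.mod_eq_emod_of_pos (show (0:Int) < 2 by norm_num),
               PySem.Int.floordiv_eq_ediv_of_pos (show (0:Int) < 2 by norm_num)]
    by_cases hpar : count % 2 = 0
    · rw [if_pos hpar]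
      obtain ⟨c, hc0, hcount⟩ : ∃ c, 0 ≤ c ∧ count = c + (c + 1) + 1 :=
        ⟨count / 2 - 1, by omega, by omega⟩
      have e1 : count / 2 - 1 = c := by omega
      have e2 : count / 2 = c + 1 := by omega
      rw [e1, e2]
      -- run A's loop
      have hrunA : pyCenterLoop count c (c + 1) [c, c + 1] 1 count.toNat
          = [c, c + 1] ++ pvPairs c (c + 1) 1 c.toNat := by
        have h := pyCenterLoop_run c (c + 1) c.toNat count.toNat 1 [c, c + 1]
          (by omega) (by simp; omega) (by omega)
        rw [← hcount] at h
        exact h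
      rw [hrunA]
      have hlen : ([c, c + 1] ++ pvPairs c (c + 1) 1 c.toNat).length = count.toNat := by
        simp [pvPairs_length]; omega
      rw [PySem.List.slice_to _ (le_of_lt hpos), List.take_of_length_le (le_of_eq hlen)]
      -- B is the same list, by uniqueness of the sorted order
      have hp := pvPairs_perm c (c + 1) c.toNat 1
      have g1 : c - 1 - ((c.toNat : Int)) + 1 = 0 := by omega
      have g2 : c - 1 + 1 = c := by ring
      rw [g1, g2] at hp
      have g4 : c + 1 + 1 + ((c.toNat : Int)) = count := by omega
      rw [g4] at hp
      have hsplit : PySem.List.pyRange 0 count 1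
          = PySem.List.pyRange 0 c 1 ++ PySem.List.pyRange c count 1 :=
        PySem.List.pyRange_one_append 0 c count (by omega) (by omega)
      have hcons : PySem.List.pyRange c count 1 = c :: PySem.List.pyRange (c + 1) count 1 :=
        PySem.List.pyRange_one_cons (by omega)
      have hcons2 : PySem.List.pyRange (c + 1) count 1
          = (c + 1) :: PySem.List.pyRange (c + 1 + 1) count 1 :=
        PySem.List.pyRange_one_cons (by omega)
      have hF : (c :: (c + 1) :: pvPairs c (c + 1) 1 c.toNat).Perm (PySem.List.pyRange 0 count 1) := by
        rw [hsplit, hcons, hcons2]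
        refine ((hp.cons (c + 1)).cons c).trans ?_
        have hm1 : ((c + 1) :: (PySem.List.pyRange 0 c 1 ++ PySem.List.pyRange (c + 1 + 1) count 1)).Perm
            (PySem.List.pyRange 0 c 1 ++ (c + 1) :: PySem.List.pyRange (c + 1 + 1) count 1) :=
          List.perm_middle.symm
        exact (hm1.cons c).trans List.perm_middle.symm
      have hk1 : pvK count c = 1 := by
        rw [hcount]
        have := pvK_left c (c + 1) 0 (by omega) (le_refl 0)
        simpa using this
      have hk2 : pvK count (c + 1) = 1 := by
        rw [hcount]
        have := pvK_right c (c + 1) 0 (by omega) (le_refl 0)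
        simpa using this
      have hchain : List.IsChain (pvSlex count) (c :: (c + 1) :: pvPairs c (c + 1) 1 c.toNat) := by
        refine List.IsChain.cons_cons (Or.inr ⟨by rw [hk1, hk2], by omega⟩) ?_
        refine List.IsChain.cons ?_ ?_
        · have h := pvPairs_chain c (c + 1) (by omega) c.toNat 1 (by omega)
          rw [← hcount] at h
          exact h
        · intro y hy
          rw [pvPairs_head c (c + 1) 1 c.toNat y hy]
          left
          rw [hk2, hcount, pvK_left c (c + 1) 1 (by omega) (by omega)]
          omega
      have hpw := pvChain_pairwise count _ hchain
      exact (sorted2_unique (fun i => |2 * i - (count - 1)|) (PySem.List.pyRange 0 count 1)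
        ([c, c + 1] ++ pvPairs c (c + 1) 1 c.toNat) hF (by
          refine hpw.imp ?_
          intro a b h
          exact h)).symm
    · rw [if_neg hpar]
      obtain ⟨c, hc0, hcount⟩ : ∃ c, 0 ≤ c ∧ count = c + c + 1 :=
        ⟨count / 2, by omega, by omega⟩
      have e1 : count / 2 = c := by omega
      rw [e1]
      have hrunA : pyCenterLoop count c c [c] 1 count.toNat
          = [c] ++ pvPairs c c 1 c.toNat := by
        have h := pyCenterLoop_run c c c.toNat count.toNat 1 [c]
          (by omega) (by simp; omega) (by omega)
        rw [← hcount] at h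
        exact h
      rw [hrunA]
      have hlen : ([c] ++ pvPairs c c 1 c.toNat).length = count.toNat := by
        simp [pvPairs_length]; omega
      rw [PySem.List.slice_to _ (le_of_lt hpos), List.take_of_length_le (le_of_eq hlen)]
      have hp := pvPairs_perm c c c.toNat 1
      have g1 : c - 1 - ((c.toNat : Int)) + 1 = 0 := by omega
      have g2 : c - 1 + 1 = c := by ring
      rw [g1, g2] at hp
      have g4 : c + 1 + ((c.toNat : Int)) = count := by omega
      rw [g4] at hp
      have hsplit : PySem.List.pyRange 0 count 1
          = PySem.List.pyRange 0 c 1 ++ PySem.List.pyRange c count 1 :=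
        PySem.List.pyRange_one_append 0 c count (by omega) (by omega)
      have hcons : PySem.List.pyRange c count 1 = c :: PySem.List.pyRange (c + 1) count 1 :=
        PySem.List.pyRange_one_cons (by omega)
      have hF : (c :: pvPairs c c 1 c.toNat).Perm (PySem.List.pyRange 0 count 1) := by
        rw [hsplit, hcons]
        refine (hp.cons c).trans ?_
        exact List.perm_middle.symm
      have hk1 : pvK count c = 0 := by
        rw [hcount]
        have := pvK_left c c 0 (le_refl c) (le_refl 0)
        simpa using this
      have hchain : List.IsChain (pvSlex count) (c :: pvPairs c c 1 c.toNat) := by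
        refine List.IsChain.cons ?_ ?_
        · have h := pvPairs_chain c c (le_refl c) c.toNat 1 (by omega)
          rw [← hcount] at h
          exact h
        · intro y hy
          rw [pvPairs_head c c 1 c.toNat y hy]
          left
          rw [hk1, hcount, pvK_left c c 1 (le_refl c) (by omega)]
          omega
      have hpw := pvChain_pairwise count _ hchain
      exact (sorted2_unique (fun i => |2 * i - (count - 1)|) (PySem.List.pyRange 0 count 1)
        ([c] ++ pvPairs c c 1 c.toNat) hF (by
          refine hpw.imp ?_
          intro a b h
          exact h)).symm
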